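-- pv_equiv track=rewrite | github.com/celestestack/EserciziITS | stringablbl_dipe.py | stringaFinale
-- ===== SOURCE A (Python) =====
-- def stringaFinale(n):
--     stringaF = ""
--     for i in range(n):
--         if i%2 == 0:
--             stringaF += "@"
--         else:
--             stringaF += "#"
--
--     return stringaF
-- ===== SOURCE B (Python) =====
-- def stringaFinale(n):
--     return ("@#" * ((n + 1) // 2))[:n]
-- ===== Notes on version B (the rewrite author's own statement) =====
-- stated objective: faster
-- what changed: Replaces the per-index loop with its parity branch by one bulk repetition of the two-character unit '@#' followed by a slice to length n.
import Mathlib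
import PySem

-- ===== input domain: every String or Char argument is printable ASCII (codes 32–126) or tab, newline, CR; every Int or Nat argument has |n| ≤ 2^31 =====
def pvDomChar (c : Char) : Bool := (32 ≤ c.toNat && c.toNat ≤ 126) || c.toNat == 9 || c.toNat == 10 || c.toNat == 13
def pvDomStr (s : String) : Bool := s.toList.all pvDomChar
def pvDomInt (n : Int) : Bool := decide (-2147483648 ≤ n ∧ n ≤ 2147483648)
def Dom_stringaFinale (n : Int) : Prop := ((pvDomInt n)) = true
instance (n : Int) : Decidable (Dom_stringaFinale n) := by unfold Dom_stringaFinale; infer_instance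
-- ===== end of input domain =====

-- B builds the '@#' repetition in bulk and slices to length n instead of A's index loop with a parity branch (objective: faster by constant factor).
-- ===== PORT A =====
def stringaFinale (n : Int) : String :=
  String.ofList ((PySem.List.pyRange 0 n 1).foldl
    (fun s i => if PySem.Int.mod i 2 = 0 then s ++ ['@'] else s ++ ['#']) [])

-- ===== PORT B =====
def stringaFinale_alt (n : Int) : String :=
  String.ofList (PySem.List.slice (PySem.List.pyRepeat ['@', '#'] (PySem.Int.floordiv (n + 1) 2)) none (some n))

-- ===== PRECONDITION & SPEC =====
def Spec_stringaFinale (n : Int) (out : String) : Prop := out = stringaFinale_alt n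
instance (n : Int) (out : String) : Decidable (Spec_stringaFinale n out) := by unfold Spec_stringaFinale; infer_instance

-- ===== CLAIM (what is proved, stated in full; the proofs are below) =====
def Claim_equal_stringaFinale : Prop := ∀ (n : Int), Dom_stringaFinale n → Spec_stringaFinale n (stringaFinale n)

-- ===== LEMMAS AND PROOFS =====

-- ===== VERDICT (by name: the statement is the Claim_ definition above) =====
-- the alternating character at index j
def pvAltChar (j : Nat) : Char := if j % 2 = 0 then '@' else '#'

theorem pvRepeat_pair (k : Nat) :
    PySem.List.pyRepeat ['@', '#'] (k : Int) = (List.range (2 * k)).map pvAltChar := by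
  induction k with
  | zero => simp [PySem.List.pyRepeat]
  | succ k ih =>
      have h1 : PySem.List.pyRepeat ['@', '#'] ((k : Int) + 1)
          = PySem.List.pyRepeat ['@', '#'] (k : Int) ++ ['@', '#'] := by
        simp [PySem.List.pyRepeat, Int.toNat_natCast]
        rw [List.replicate_succ', List.flatten_append]
        simp
      have h2 : List.range (2 * (k + 1)) = List.range (2 * k) ++ [2 * k, 2 * k + 1] := by
        rw [show 2 * (k + 1) = (2 * k + 1) + 1 by ring, List.range_succ, List.range_succ]
        simp
      push_cast
      rw [h1, ih, h2]
      simp [pvAltChar, Nat.mul_mod_right]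

theorem pvFold_eq (m : Nat) :
    (PySem.List.pyRange 0 (m : Int) 1).foldl
      (fun s i => if PySem.Int.mod i 2 = 0 then s ++ ['@'] else s ++ ['#']) []
    = (List.range m).map pvAltChar := by
  induction m with
  | zero => simp [PySem.List.pyRange_one_eq_nil]
  | succ m ih =>
      have h : PySem.List.pyRange 0 ((m : Int) + 1) 1
          = PySem.List.pyRange 0 (m : Int) 1 ++ [(m : Int)] := by
        exact PySem.List.pyRange_one_succ_right (by positivity)
      have hmod : PySem.Int.mod (m : Int) 2 = ((m % 2 : Nat) : Int) := by
        simp [PySem.Int.mod, Int.fmod_eq_emod]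
      push_cast
      rw [h, List.foldl_append, ih, List.range_succ, List.map_append]
      rcases Nat.even_or_odd m with he | ho
      · have h0 : m % 2 = 0 := Nat.even_iff.mp he
        simp [h0, pvAltChar]
        omega
      · have h1 : m % 2 = 1 := Nat.odd_iff.mp ho
        simp [h1, pvAltChar]
        omega

theorem stringaFinale_spec : Claim_equal_stringaFinale := by
  intro n _
  unfold Spec_stringaFinale stringaFinale stringaFinale_alt
  by_cases hn : n ≤ 0
  · rw [PySem.List.pyRange_one_eq_nil hn]
    simp [PySem.List.pyRepeat, PySem.List.slice]
    omega
  · rw [not_le] at hn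
    obtain ⟨m, rfl⟩ : ∃ m : Nat, n = (m : Int) := ⟨n.toNat, (Int.toNat_of_nonneg hn.le).symm⟩
    rw [pvFold_eq]
    have hfd : PySem.Int.floordiv ((m : Int) + 1) 2 = (((m + 1) / 2 : Nat) : Int) := by
      simp only [PySem.Int.floordiv, Int.fdiv_eq_ediv_of_nonneg _ (by norm_num : (0:Int) ≤ 2)]
      omega
    rw [hfd, pvRepeat_pair, PySem.List.slice_to _ (Int.natCast_nonneg m)]
    rw [Int.toNat_natCast, List.map_take.symm, List.take_range]
    rw [show min m (2 * ((m + 1) / 2)) = m by omega]
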